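-- pv_equiv track=rewrite | github.com/Qingluan/Mroylib-min | build/lib/qlib/text/parser.py | extract_regex
-- ===== SOURCE A (Python) =====
-- import re, itertools
-- from string import digits, ascii_letters ,punctuation, whitespace
--
-- def extract_regex(string):
--     res =[]
--     last = ''
--     last_k = 0
--     for k, group in itertools.groupby(string):
--         if k in ascii_letters:
--             l, k = '\w', len(list(group))
--             if l == last:
--                 last_k += k
--             else:
--                 res.append([last, last_k])
--                 last_k = k
--                 last = l
--
--         elif k in digits:
--             l, k = '\d', len(list(group))
--             if l == last:
--                 last_k += k
--             else:
--                 res.append([last, last_k])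
--                 last_k = k
--                 last = l
--
--         elif k in punctuation:
--             l, k = '\%s' % k , len(list(group))
--             if l == last:
--                 last_k += k
--             else:
--                 res.append([last, last_k])
--                 last_k = k
--                 last = l
--
--         elif k in whitespace:
--             l, k = '\s', len(list(group))
--             if l == last:
--                 last_k += k
--             else:
--                 res.append([last, last_k])
--                 last_k = k
--                 last = l
--         else:
--             l, k = '.', len(list(group))
--             if l == last:
--                 last_k += k
--             else:
--                 res.append([last, last_k])
--                 last_k = k
--                 last = l
--     res.append([last, last_k])
--     return [i[0] for i in res[1:]], [i[1] for i in res[1:]]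
-- ===== SOURCE B (Python) =====
-- from string import digits, ascii_letters, punctuation, whitespace
--
--
-- def _label(c):
--     if c in ascii_letters:
--         return '\\w'
--     if c in digits:
--         return '\\d'
--     if c in punctuation:
--         return '\\%s' % c
--     if c in whitespace:
--         return '\\s'
--     return '.'
--
--
-- def extract_regex(string):
--     # Two-pointer scan over the precomputed label list: for each run start i,
--     # advance j to the end of the run; the count is the index difference j - i.
--     labels = [_label(c) for c in string]
--     n = len(labels)
--     runs = []
--     i = 0
--     while i < n:
--         j = i + 1
--         while j < n and labels[j] == labels[i]:
--             j += 1
--         runs.append((labels[i], j - i))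
--         i = j
--     return [p for p, _ in runs], [k for _, k in runs]
-- ===== Notes on version B (the rewrite author's own statement) =====
-- stated objective: alternative
-- what changed: Replaces itertools.groupby plus five duplicated sentinel-based merge branches with a two-pointer scan over a precomputed label list: each run is delimited by advancing an end pointer and its count is the index difference, so no run merging or ['',0] sentinel occurs at all.
import Mathlib
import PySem

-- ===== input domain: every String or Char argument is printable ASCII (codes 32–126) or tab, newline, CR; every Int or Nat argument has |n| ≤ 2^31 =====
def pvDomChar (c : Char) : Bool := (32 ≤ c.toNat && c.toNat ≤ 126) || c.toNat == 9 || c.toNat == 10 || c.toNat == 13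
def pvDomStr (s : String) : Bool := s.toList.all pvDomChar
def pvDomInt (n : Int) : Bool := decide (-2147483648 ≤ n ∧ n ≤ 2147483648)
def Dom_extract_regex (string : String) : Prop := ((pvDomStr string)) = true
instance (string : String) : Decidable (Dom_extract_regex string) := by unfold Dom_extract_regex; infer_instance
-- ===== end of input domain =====

-- B is a two-pointer index scan over a precomputed label list (count = index difference),
-- instead of A's itertools.groupby over characters followed by sentinel-based run merging.

-- membership tests against string.ascii_letters/digits/punctuation/whitespace (exact on all chars)
def pvIsLetter (c : Char) : Bool := ('a' ≤ c && c ≤ 'z') || ('A' ≤ c && c ≤ 'Z')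
def pvIsDigit (c : Char) : Bool := '0' ≤ c && c ≤ '9'
def pvIsPunct (c : Char) : Bool :=
  ('!' ≤ c && c ≤ '/') || (':' ≤ c && c ≤ '@') || ('[' ≤ c && c ≤ '`') || ('{' ≤ c && c ≤ '~')
def pvIsSpace (c : Char) : Bool :=
  c = ' ' || c = '\t' || c = '\n' || c = '\r' || c = '\x0b' || c = '\x0c'

-- ===== PORT A =====
-- itertools.groupby over the characters: maximal runs of equal characters with their lengths
def pvGroupBy : List Char → List (Char × Int)
  | [] => []
  | c :: rest =>
    match pvGroupBy rest with
    | [] => [(c, 1)]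
    | (d, n) :: t => if c = d then (c, n + 1) :: t else (c, 1) :: (d, n) :: t

-- one iteration of A's for-loop: state (res, last, last_k); the five branches compute l,
-- then all perform the identical merge-or-append
def pvStepA (st : List (String × Int) × String × Int) (g : Char × Int) :
    List (String × Int) × String × Int :=
  let l : String :=
    if pvIsLetter g.1 then "\\w"
    else if pvIsDigit g.1 then "\\d"
    else if pvIsPunct g.1 then String.ofList ['\\', g.1]   -- '\%s' % k
    else if pvIsSpace g.1 then "\\s"
    else "."
  if l = st.2.1 then (st.1, st.2.1, st.2.2 + g.2)
  else (st.1 ++ [(st.2.1, st.2.2)], l, g.2)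

def extract_regex (string : String) : List String × List Int :=
  let st := (pvGroupBy string.toList).foldl pvStepA ([], "", 0)
  let res := (st.1 ++ [(st.2.1, st.2.2)]).drop 1       -- res.append([last, last_k]); res[1:]
  (res.map Prod.fst, res.map Prod.snd)

-- ===== PORT B =====
def pvLabel (c : Char) : String :=
  if pvIsLetter c then "\\w"
  else if pvIsDigit c then "\\d"
  else if pvIsPunct c then String.ofList ['\\', c]
  else if pvIsSpace c then "\\s"
  else "."

-- inner while: advance j while j < n and labels[j] == labels[i]
def pvRunEnd (ls : List String) (l : String) (j : Nat) : Nat :=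
  if j < ls.length && ls.getD j "" == l then pvRunEnd ls l (j + 1) else j
termination_by ls.length - j
decreasing_by simp_all; omega

theorem pvRunEnd_ge (ls : List String) (l : String) (j : Nat) : j ≤ pvRunEnd ls l j := by
  unfold pvRunEnd
  split
  · exact le_trans (Nat.le_succ j) (pvRunEnd_ge ls l (j + 1))
  · exact le_refl j
termination_by ls.length - j
decreasing_by simp_all; omega

-- outer while over run starts
def pvScan (ls : List String) (i : Nat) : List (String × Int) :=
  if h : i < ls.length then
    (ls.getD i "", ((pvRunEnd ls (ls.getD i "") (i + 1)) : Int) - (i : Int))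
      :: pvScan ls (pvRunEnd ls (ls.getD i "") (i + 1))
  else []
termination_by ls.length - i
decreasing_by
  have := pvRunEnd_ge ls (ls.getD i "") (i + 1)
  omega

def extract_regex_alt (string : String) : List String × List Int :=
  ((pvScan (string.toList.map pvLabel) 0).map Prod.fst,
   (pvScan (string.toList.map pvLabel) 0).map Prod.snd)

-- ===== PRECONDITION & SPEC =====
def Spec_extract_regex (string : String) (out : List String × List Int) : Prop := out = extract_regex_alt string
instance (string : String) (out : List String × List Int) : Decidable (Spec_extract_regex string out) := by unfold Spec_extract_regex; infer_instance

-- ===== CLAIM (what is proved, stated in full; the proofs are below) =====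
def Claim_equal_extract_regex : Prop := ∀ (string : String), Dom_extract_regex string → Spec_extract_regex string (extract_regex string)

-- ===== LEMMAS AND PROOFS =====

theorem pvRunEnd_le (ls : List String) (l : String) (j : Nat) (h : j ≤ ls.length) :
    pvRunEnd ls l j ≤ ls.length := by
  unfold pvRunEnd
  split
  · next hc =>
    simp only [Bool.and_eq_true, decide_eq_true_eq] at hc
    exact pvRunEnd_le ls l (j + 1) hc.1
  · exact h
termination_by ls.length - j
decreasing_by simp_all; omega


-- merge a run onto the front of a merged run list
def pvMrg (p : String × Int) : List (String × Int) → List (String × Int)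
  | [] => [p]
  | q :: t => if q.1 = p.1 then (p.1, p.2 + q.2) :: t else p :: q :: t

def pvRle : List String → List (String × Int)
  | [] => []
  | l :: ls => pvMrg (l, 1) (pvRle ls)

def pvRleG : List (Char × Int) → List (String × Int)
  | [] => []
  | g :: t => pvMrg (pvLabel g.1, g.2) (pvRleG t)

theorem pvMrg_nil (p : String × Int) : pvMrg p [] = [p] := rfl

theorem pvMrg_cons (p q : String × Int) (t : List (String × Int)) :
    pvMrg p (q :: t) = if q.1 = p.1 then (p.1, p.2 + q.2) :: t else p :: q :: t := rfl

theorem pvMrg_head (p : String × Int) (xs : List (String × Int)) :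
    ∃ n t, pvMrg p xs = (p.1, n) :: t := by
  cases xs with
  | nil => exact ⟨p.2, [], rfl⟩
  | cons q t =>
    rw [pvMrg_cons]
    by_cases h : q.1 = p.1
    · exact ⟨p.2 + q.2, t, by rw [if_pos h]⟩
    · exact ⟨p.2, q :: t, by rw [if_neg h]⟩

theorem pvMrg_mrg_same (l : String) (a b : Int) (xs : List (String × Int)) :
    pvMrg (l, a) (pvMrg (l, b) xs) = pvMrg (l, a + b) xs := by
  cases xs with
  | nil => simp [pvMrg_nil, pvMrg_cons]
  | cons q t =>
    by_cases h : q.1 = l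
    · simp [pvMrg_cons, h, add_assoc]
    · simp [pvMrg_cons, h]

theorem pvStepA_eq (st : List (String × Int) × String × Int) (g : Char × Int) :
    pvStepA st g =
      if pvLabel g.1 = st.2.1 then (st.1, st.2.1, st.2.2 + g.2)
      else (st.1 ++ [(st.2.1, st.2.2)], pvLabel g.1, g.2) := rfl

theorem pvLabel_ne_empty (c : Char) : pvLabel c ≠ "" := by
  unfold pvLabel
  split_ifs <;> intro h <;> have := congrArg String.toList h <;> simp at this

theorem lemA (gs : List (Char × Int)) :
    ∀ (res : List (String × Int)) (last : String) (lk : Int),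
      (let st := gs.foldl pvStepA (res, last, lk)
       st.1 ++ [(st.2.1, st.2.2)]) = res ++ pvMrg (last, lk) (pvRleG gs) := by
  induction gs with
  | nil => intro res last lk; simp [pvRleG, pvMrg_nil]
  | cons g t ih =>
    intro res last lk
    simp only [List.foldl_cons, pvStepA_eq]
    by_cases h : pvLabel g.1 = last
    · rw [if_pos h, show pvRleG (g :: t) = pvMrg (pvLabel g.1, g.2) (pvRleG t) from rfl, h,
        pvMrg_mrg_same]
      exact ih res last (lk + g.2)
    · rw [if_neg h, ih,
        show pvRleG (g :: t) = pvMrg (pvLabel g.1, g.2) (pvRleG t) from rfl]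
      obtain ⟨n, u, hu⟩ := pvMrg_head (pvLabel g.1, g.2) (pvRleG t)
      rw [hu, pvMrg_cons, if_neg h]
      simp

theorem rleG_groupBy (cs : List Char) : pvRleG (pvGroupBy cs) = pvRle (cs.map pvLabel) := by
  induction cs with
  | nil => rfl
  | cons c t ih =>
    show pvRleG (match pvGroupBy t with
      | [] => [(c, 1)]
      | (d, n) :: u => if c = d then (c, n + 1) :: u else (c, 1) :: (d, n) :: u)
      = pvMrg (pvLabel c, 1) (pvRle (t.map pvLabel))
    rw [← ih]
    cases hg : pvGroupBy t with
    | nil => simp [pvRleG, pvMrg_nil]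
    | cons g u =>
      obtain ⟨d, n⟩ := g
      by_cases h : c = d
      · simp only [if_pos h]
        show pvMrg (pvLabel c, n + 1) (pvRleG u)
            = pvMrg (pvLabel c, 1) (pvRleG ((d, n) :: u))
        rw [show pvRleG ((d, n) :: u) = pvMrg (pvLabel d, n) (pvRleG u) from rfl, ← h,
          pvMrg_mrg_same, add_comm]
      · simp only [if_neg h]
        rfl

theorem rleG_shape (gs : List (Char × Int)) :
    pvRleG gs = [] ∨ ∃ c n t, pvRleG gs = (pvLabel c, n) :: t := by
  cases gs with
  | nil => exact Or.inl rfl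
  | cons g u =>
    right
    obtain ⟨n, t, ht⟩ := pvMrg_head (pvLabel g.1, g.2) (pvRleG u)
    exact ⟨g.1, n, t, ht⟩

theorem a_eq_rleG (s : String) :
    extract_regex s =
      ((pvRleG (pvGroupBy s.toList)).map Prod.fst,
       (pvRleG (pvGroupBy s.toList)).map Prod.snd) := by
  have h := lemA (pvGroupBy s.toList) [] "" 0
  simp only [List.nil_append] at h
  show (((((pvGroupBy s.toList).foldl pvStepA ([], "", 0)).1 ++
        [(((pvGroupBy s.toList).foldl pvStepA ([], "", 0)).2.1,
          ((pvGroupBy s.toList).foldl pvStepA ([], "", 0)).2.2)]).drop 1).map Prod.fst,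
        ((((pvGroupBy s.toList).foldl pvStepA ([], "", 0)).1 ++
        [(((pvGroupBy s.toList).foldl pvStepA ([], "", 0)).2.1,
          ((pvGroupBy s.toList).foldl pvStepA ([], "", 0)).2.2)]).drop 1).map Prod.snd) = _
  rw [h]
  rcases rleG_shape (pvGroupBy s.toList) with hs | ⟨c, n, t, hs⟩
  · simp [hs, pvMrg_nil]
  · rw [hs, pvMrg_cons, if_neg (by simpa using pvLabel_ne_empty c)]
    simp

-- span characterization of pvRle: the head run is the maximal prefix of equal labels
theorem rle_span (t : List String) : ∀ (l : String),
    pvRle (l :: t) =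
      (l, 1 + ((t.takeWhile (· == l)).length : Int)) :: pvRle (t.dropWhile (· == l)) := by
  induction t with
  | nil => intro l; simp [pvRle, pvMrg_nil]
  | cons m u ih =>
    intro l
    by_cases h : m = l
    · subst h
      rw [show pvRle (m :: m :: u) = pvMrg (m, 1) (pvRle (m :: u)) from rfl, ih m,
        pvMrg_cons, if_pos rfl]
      simp [List.takeWhile, List.dropWhile]
      ring_nf
    · rw [show pvRle (l :: m :: u) = pvMrg (l, 1) (pvRle (m :: u)) from rfl, ih m,
        pvMrg_cons, if_neg (by simpa using h)]
      simp [h, ih m]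

-- pvRunEnd computes start + length of the matching prefix of the dropped list
theorem runEnd_drop (ls : List String) (l : String) (j : Nat) :
    pvRunEnd ls l j = j + ((ls.drop j).takeWhile (· == l)).length := by
  unfold pvRunEnd
  split
  · next hc =>
    simp only [Bool.and_eq_true, decide_eq_true_eq, beq_iff_eq] at hc
    obtain ⟨hlt, heq⟩ := hc
    have hdrop : ls.drop j = ls[j] :: ls.drop (j + 1) := List.drop_eq_getElem_cons hlt
    have hget : ls.getD j "" = ls[j] := List.getD_eq_getElem ls "" hlt
    rw [runEnd_drop ls l (j + 1), hdrop, List.takeWhile_cons,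
      if_pos (by rw [← hget, heq]; simp)]
    simp; omega
  · next hc =>
    simp only [Bool.and_eq_true, not_and_or, decide_eq_true_eq, beq_iff_eq] at hc
    rcases Nat.lt_or_ge j ls.length with hlt | hge
    · have hdrop : ls.drop j = ls[j] :: ls.drop (j + 1) := List.drop_eq_getElem_cons hlt
      have hget : ls.getD j "" = ls[j] := List.getD_eq_getElem ls "" hlt
      have hne : ¬ (ls[j] == l) = true := by
        rcases hc with h1 | h2
        · omega
        · rw [← hget]; simpa using h2
      rw [hdrop, List.takeWhile_cons, if_neg hne]
      simp
    · rw [List.drop_eq_nil_of_le hge]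
      simp
termination_by ls.length - j
decreasing_by simp_all; omega

-- pvScan from index i is the run-length encoding of the dropped suffix
theorem drop_takeWhile_length {α : Type} (p : α → Bool) (l : List α) :
    l.drop (l.takeWhile p).length = l.dropWhile p := by
  induction l with
  | nil => rfl
  | cons x t ih =>
    by_cases h : p x
    · simpa [h] using ih
    · simp [h]

theorem scan_eq_rle (ls : List String) (i : Nat) : i ≤ ls.length →
    pvScan ls i = pvRle (ls.drop i) := by
  intro hi
  unfold pvScan
  split
  · next hlt =>
    have hdrop : ls.drop i = ls[i] :: ls.drop (i + 1) := List.drop_eq_getElem_cons hlt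
    have hget : ls.getD i "" = ls[i] := List.getD_eq_getElem ls "" hlt
    have hre := runEnd_drop ls (ls.getD i "") (i + 1)
    have hle : pvRunEnd ls (ls.getD i "") (i + 1) ≤ ls.length :=
      pvRunEnd_le ls (ls.getD i "") (i + 1) hlt
    rw [scan_eq_rle ls (pvRunEnd ls (ls.getD i "") (i + 1)) hle]
    rw [hdrop, rle_span (ls.drop (i + 1)) ls[i], hget] at *
    have hcnt : ((pvRunEnd ls ls[i] (i + 1)) : Int) - (i : Int)
        = 1 + (((ls.drop (i + 1)).takeWhile (· == ls[i])).length : Int) := by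
      push_cast [hre]
      omega
    have hsuf : ls.drop (pvRunEnd ls ls[i] (i + 1))
        = (ls.drop (i + 1)).dropWhile (· == ls[i]) := by
      rw [hre, ← List.drop_drop, drop_takeWhile_length]
    rw [hcnt, hsuf]
  · next hge =>
    rw [List.drop_eq_nil_of_le (by omega)]
    rfl
termination_by ls.length - i
decreasing_by
  have := pvRunEnd_ge ls (ls.getD i "") (i + 1)
  omega

-- ===== VERDICT (by name: the statement is the Claim_ definition above) =====
theorem extract_regex_spec : Claim_equal_extract_regex := by
  intro s _
  unfold Spec_extract_regex
  rw [a_eq_rleG, rleG_groupBy]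
  unfold extract_regex_alt
  rw [show pvScan (s.toList.map pvLabel) 0 = pvRle ((s.toList.map pvLabel).drop 0) from
    scan_eq_rle _ 0 (Nat.zero_le _), List.drop_zero]
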